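-- pv_equiv track=rewrite | github.com/AutoclickerI/Baekjoon | 백준/Bronze/15121. Star Arrangements/Star Arrangements.py | star_arrangements
-- ===== SOURCE A (Python) =====
-- def star_arrangements(S):
--     patterns = []
--     # 1) x = y
--     for x in range(2, S//2 + 1):
--         if S % x == 0:
--             if S // x >= 2:
--                 patterns.append((x, x))
--     # 2) x = y + 1
--     for y in range(1, S//2 + 1):
--         x = y + 1
--         total = x + y
--         # 짝수 행
--         if S % total == 0:
--             k = S // total
--             if k >= 1:
--                 patterns.append((x, y))
--                 continue
--         # 홀수 행
--         if (S - x) % total == 0: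
--             k = (S - x) // total
--             if k >= 1:
--                 patterns.append((x, y))
--     # 정렬 및 중복 제거
--     patterns = sorted(set(patterns))
--     return patterns
-- ===== SOURCE B (Python) =====
-- def star_arrangements(S):
--     # Enumerate divisors in O(sqrt S) instead of scanning all candidates up to S//2.
--     def divisors(n):
--         ds = []
--         i = 1
--         while i * i <= n:
--             if n % i == 0:
--                 ds.append(i)
--                 if i != n // i:
--                     ds.append(n // i)
--             i += 1
--         return ds
--
--     pats = [(x, x) for x in divisors(S) if x >= 2 and S // x >= 2]
--     # rows alternating x and y=x-1 stars, an even number of rows: (x+y) = 2y+1 divides S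
--     pats += [((t + 1) // 2, (t - 1) // 2) for t in divisors(S) if t >= 3 and t % 2 == 1]
--     # odd number of rows: t = 2y+1 divides S - (y+1), i.e. t divides 2S-1, with at least 3 rows' worth
--     pats += [((t + 1) // 2, (t - 1) // 2) for t in divisors(2 * S - 1) if t >= 3 and 3 * t <= 2 * S - 1]
--     return sorted(set(pats))
-- ===== Notes on version B (the rewrite author's own statement) =====
-- stated objective: faster
-- what changed: Instead of scanning every candidate row size up to half of S (linearly many trial divisions), B enumerates the divisors of S and of twice-S-minus-one up to the square root and maps each qualifying divisor directly to its (x,y) pattern.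
import Mathlib
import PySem

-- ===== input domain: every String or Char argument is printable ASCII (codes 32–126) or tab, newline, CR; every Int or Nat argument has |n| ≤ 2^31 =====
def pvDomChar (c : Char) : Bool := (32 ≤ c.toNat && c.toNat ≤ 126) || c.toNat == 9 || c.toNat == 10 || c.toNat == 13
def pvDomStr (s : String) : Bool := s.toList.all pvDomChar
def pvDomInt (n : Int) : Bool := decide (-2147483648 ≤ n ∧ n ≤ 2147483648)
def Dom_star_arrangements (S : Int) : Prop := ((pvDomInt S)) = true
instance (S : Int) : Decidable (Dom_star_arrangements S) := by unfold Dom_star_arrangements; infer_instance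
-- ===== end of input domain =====

-- B enumerates divisors of S and of twice-S-minus-one in square-root time instead of A's linear scan of all row sizes.


-- ===== PORT A =====
def star_arrangements (S : Int) : List (Int × Int) :=
  let p1 : List (Int × Int) :=
    (PySem.List.pyRange 2 (PySem.Int.floordiv S 2 + 1) 1).foldl
      (fun acc x =>
        if PySem.Int.mod S x = 0 ∧ 2 ≤ PySem.Int.floordiv S x then acc ++ [(x, x)] else acc) []
  let p2 : List (Int × Int) :=
    (PySem.List.pyRange 1 (PySem.Int.floordiv S 2 + 1) 1).foldl
      (fun acc y =>
        let x := y + 1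
        let total := x + y
        if PySem.Int.mod S total = 0 ∧ 1 ≤ PySem.Int.floordiv S total then acc ++ [(x, y)]
        else if PySem.Int.mod (S - x) total = 0 ∧ 1 ≤ PySem.Int.floordiv (S - x) total then
          acc ++ [(x, y)]
        else acc) p1
  PySem.List.sorted2 (PySem.Set.ofList p2) (fun p => p.1) (fun p => p.2) false

-- ===== PORT B =====
-- the `while i*i <= n` loop of Source B's divisors(); the 0 < i conjunct only makes the recursion well-founded
def divisorsAux (n : Int) (i : Nat) (acc : List Int) : List Int :=
  if h : 0 < i ∧ (i : Int) * i ≤ n then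
    divisorsAux n (i + 1)
      (if PySem.Int.mod n i = 0 then
        acc ++ (i : Int) :: (if (i : Int) = PySem.Int.floordiv n i then []
          else [PySem.Int.floordiv n i])
      else acc)
  else acc
termination_by n.toNat + 1 - i
decreasing_by
  have h1 : (i : Int) ≤ (i : Int) * i :=
    le_mul_of_one_le_right (by exact_mod_cast Nat.zero_le i) (by exact_mod_cast h.1)
  have h2 : (i : Int) ≤ n := h1.trans h.2
  omega

def divisors (n : Int) : List Int := divisorsAux n 1 []

def star_arrangements_alt (S : Int) : List (Int × Int) :=
  let pats : List (Int × Int) :=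
    ((divisors S).filter (fun x => decide (2 ≤ x) && decide (2 ≤ PySem.Int.floordiv S x))).map
        (fun x => (x, x))
    ++ ((divisors S).filter (fun t => decide (3 ≤ t) && decide (PySem.Int.mod t 2 = 1))).map
        (fun t => (PySem.Int.floordiv (t + 1) 2, PySem.Int.floordiv (t - 1) 2))
    ++ ((divisors (2 * S - 1)).filter
          (fun t => decide (3 ≤ t) && decide (3 * t ≤ 2 * S - 1))).map
        (fun t => (PySem.Int.floordiv (t + 1) 2, PySem.Int.floordiv (t - 1) 2))
  PySem.List.sorted2 (PySem.Set.ofList pats) (fun p => p.1) (fun p => p.2) false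

-- ===== PRECONDITION & SPEC =====
def Spec_star_arrangements (S : Int) (out : List (Int × Int)) : Prop := out = star_arrangements_alt S
instance (S : Int) (out : List (Int × Int)) : Decidable (Spec_star_arrangements S out) := by unfold Spec_star_arrangements; infer_instance

-- ===== CLAIM (what is proved, stated in full; the proofs are below) =====
def Claim_equal_star_arrangements : Prop := ∀ (S : Int), Dom_star_arrangements S → Spec_star_arrangements S (star_arrangements S)

-- ===== LEMMAS AND PROOFS =====

-- the raw (pre-sort, pre-dedup) pattern lists of the two ports
def LA (S : Int) : List (Int × Int) :=
  ((PySem.List.pyRange 1 (PySem.Int.floordiv S 2 + 1) 1).foldl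
    (fun acc y =>
      if PySem.Int.mod S (y + 1 + y) = 0 ∧ 1 ≤ PySem.Int.floordiv S (y + 1 + y) then
        acc ++ [(y + 1, y)]
      else if PySem.Int.mod (S - (y + 1)) (y + 1 + y) = 0 ∧
          1 ≤ PySem.Int.floordiv (S - (y + 1)) (y + 1 + y) then
        acc ++ [(y + 1, y)]
      else acc)
    ((PySem.List.pyRange 2 (PySem.Int.floordiv S 2 + 1) 1).foldl
      (fun acc x =>
        if PySem.Int.mod S x = 0 ∧ 2 ≤ PySem.Int.floordiv S x then acc ++ [(x, x)] else acc) []))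

def LB (S : Int) : List (Int × Int) :=
  ((divisors S).filter (fun x => decide (2 ≤ x) && decide (2 ≤ PySem.Int.floordiv S x))).map
      (fun x => (x, x))
  ++ ((divisors S).filter (fun t => decide (3 ≤ t) && decide (PySem.Int.mod t 2 = 1))).map
      (fun t => (PySem.Int.floordiv (t + 1) 2, PySem.Int.floordiv (t - 1) 2))
  ++ ((divisors (2 * S - 1)).filter
        (fun t => decide (3 ≤ t) && decide (3 * t ≤ 2 * S - 1))).map
      (fun t => (PySem.Int.floordiv (t + 1) 2, PySem.Int.floordiv (t - 1) 2))

lemma mem_foldl_if {α β : Type} (p : α → Prop) [DecidablePred p] (f : α → β)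
    (l : List α) (acc : List β) (b : β) :
    b ∈ l.foldl (fun acc x => if p x then acc ++ [f x] else acc) acc ↔
      b ∈ acc ∨ ∃ x, x ∈ l ∧ p x ∧ b = f x := by
  have h : (fun (acc : List β) x => if p x then acc ++ [f x] else acc)
      = fun acc x => if (fun x => decide (p x)) x = true then acc ++ [f x] else acc := by
    funext a x; by_cases hp : p x <;> simp [hp]
  rw [h, PySem.List.foldl_append_if]
  simp [List.mem_filter, eq_comm, and_assoc]

lemma mem_LA (S : Int) (p : Int × Int) :
    p ∈ LA S ↔
      (∃ x, 2 ≤ x ∧ x < PySem.Int.floordiv S 2 + 1 ∧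
        (PySem.Int.mod S x = 0 ∧ 2 ≤ PySem.Int.floordiv S x) ∧ p = (x, x)) ∨
      (∃ y, 1 ≤ y ∧ y < PySem.Int.floordiv S 2 + 1 ∧
        ((PySem.Int.mod S (y + 1 + y) = 0 ∧ 1 ≤ PySem.Int.floordiv S (y + 1 + y)) ∨
          (PySem.Int.mod (S - (y + 1)) (y + 1 + y) = 0 ∧
            1 ≤ PySem.Int.floordiv (S - (y + 1)) (y + 1 + y))) ∧ p = (y + 1, y)) := by
  have hbody : (fun (acc : List (Int × Int)) y =>
      if PySem.Int.mod S (y + 1 + y) = 0 ∧ 1 ≤ PySem.Int.floordiv S (y + 1 + y) then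
        acc ++ [(y + 1, y)]
      else if PySem.Int.mod (S - (y + 1)) (y + 1 + y) = 0 ∧
          1 ≤ PySem.Int.floordiv (S - (y + 1)) (y + 1 + y) then
        acc ++ [(y + 1, y)]
      else acc)
      = fun acc y =>
        if (fun y => (PySem.Int.mod S (y + 1 + y) = 0 ∧ 1 ≤ PySem.Int.floordiv S (y + 1 + y)) ∨
          (PySem.Int.mod (S - (y + 1)) (y + 1 + y) = 0 ∧
            1 ≤ PySem.Int.floordiv (S - (y + 1)) (y + 1 + y))) y then
          acc ++ [((fun y => (y + 1, y)) y)] else acc := by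
    funext acc y
    split_ifs <;> tauto
  rw [LA, hbody, mem_foldl_if, mem_foldl_if]
  simp only [List.not_mem_nil, false_or, PySem.List.mem_pyRange_one]
  constructor
  · rintro (⟨x, ⟨hx1, hx2⟩, hc, rfl⟩ | ⟨y, ⟨hy1, hy2⟩, hc, rfl⟩)
    · exact Or.inl ⟨x, hx1, hx2, hc, rfl⟩
    · exact Or.inr ⟨y, hy1, hy2, hc, rfl⟩
  · rintro (⟨x, hx1, hx2, hc, rfl⟩ | ⟨y, hy1, hy2, hc, rfl⟩)
    · exact Or.inl ⟨x, ⟨hx1, hx2⟩, hc, rfl⟩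
    · exact Or.inr ⟨y, ⟨hy1, hy2⟩, hc, rfl⟩

lemma mem_divisorsAux (n d : Int) (i : Nat) (acc : List Int) (hi : 0 < i) :
    d ∈ divisorsAux n i acc ↔
      d ∈ acc ∨ ∃ j : Nat, i ≤ j ∧ (j : Int) * j ≤ n ∧ PySem.Int.mod n j = 0 ∧
        (d = (j : Int) ∨ d = PySem.Int.floordiv n j) := by
  rw [divisorsAux]
  split
  case isTrue h =>
    rw [mem_divisorsAux n d (i + 1) _ (by omega)]
    constructor
    · rintro (hmem | ⟨j, hj, hjj, hm, hd⟩)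
      · split_ifs at hmem with hm heq
        · rcases List.mem_append.mp hmem with hmem | hmem
          · exact Or.inl hmem
          · rcases List.mem_cons.mp hmem with rfl | hmem
            · exact Or.inr ⟨i, le_refl i, h.2, hm, Or.inl rfl⟩
            · simp at hmem
        · rcases List.mem_append.mp hmem with hmem | hmem
          · exact Or.inl hmem
          · rcases List.mem_cons.mp hmem with rfl | hmem
            · exact Or.inr ⟨i, le_refl i, h.2, hm, Or.inl rfl⟩
            · rcases List.mem_singleton.mp hmem with rfl
              exact Or.inr ⟨i, le_refl i, h.2, hm, Or.inr rfl⟩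
        · exact Or.inl hmem
      · exact Or.inr ⟨j, by omega, hjj, hm, hd⟩
    · rintro (hmem | ⟨j, hj, hjj, hm, hd⟩)
      · left
        split_ifs <;> simp [hmem]
      · by_cases hji : j = i
        · subst hji
          left
          rw [if_pos hm]
          rcases hd with rfl | rfl
          · simp
          · by_cases heq : (j : Int) = PySem.Int.floordiv n j
            · simp [heq.symm]
            · simp [heq]
        · exact Or.inr ⟨j, by omega, hjj, hm, hd⟩
  case isFalse h =>
    constructor
    · exact Or.inl
    · rintro (hmem | ⟨j, hj, hjj, -, -⟩)
      · exact hmem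
      · exfalso
        have hn : n < (i : Int) * i := by
          by_contra hh
          push_neg at hh
          exact h ⟨hi, hh⟩
        have hij : (i : Int) ≤ (j : Int) := by exact_mod_cast hj
        have hnn : (0 : Int) ≤ (i : Int) := Int.natCast_nonneg i
        nlinarith
termination_by n.toNat + 1 - i
decreasing_by
  rename_i h
  have h2 : (i : Int) ≤ n :=
    le_trans (le_mul_of_one_le_right (by exact_mod_cast Nat.zero_le i) (by exact_mod_cast h.1)) h.2
  omega

lemma fdiv_mul_cancel (a b : Int) (hb : 0 < b) : PySem.Int.floordiv (b * a) b = a := by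
  rw [PySem.Int.floordiv_eq_ediv_of_pos hb, Int.mul_ediv_cancel_left _ (by omega)]

lemma mem_divisors (n : Int) (hn : 1 ≤ n) (d : Int) :
    d ∈ divisors n ↔ d ∣ n ∧ 1 ≤ d := by
  rw [divisors, mem_divisorsAux n d 1 [] (by omega)]
  simp only [List.not_mem_nil, false_or]
  constructor
  · rintro ⟨j, hj1, hjj, hm, hd⟩
    have hjdvd : (j : Int) ∣ n := (PySem.Int.mod_eq_zero_iff_dvd n j).mp hm
    have hj1' : (1 : Int) ≤ (j : Int) := by exact_mod_cast hj1
    rcases hjdvd with ⟨c, hc⟩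
    have hfd : PySem.Int.floordiv n j = c := by rw [hc]; exact fdiv_mul_cancel c j (by omega)
    have hc1 : 1 ≤ c := by nlinarith
    rcases hd with rfl | rfl
    · exact ⟨⟨c, hc⟩, hj1'⟩
    · rw [hfd]
      exact ⟨⟨(j : Int), by rw [hc]; ring⟩, hc1⟩
  · rintro ⟨⟨e, he⟩, hd1⟩
    have he1 : 1 ≤ e := by nlinarith
    by_cases hdd : d * d ≤ n
    · refine ⟨d.toNat, by omega, ?_, ?_, Or.inl (by omega)⟩
      · push_cast [Int.toNat_of_nonneg (by omega : (0 : Int) ≤ d)]; exact hdd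
      · rw [Int.toNat_of_nonneg (by omega : (0 : Int) ≤ d)]
        exact (PySem.Int.mod_eq_zero_iff_dvd n d).mpr ⟨e, he⟩
    · push_neg at hdd
      have hed : e < d := by nlinarith
      refine ⟨e.toNat, by omega, ?_, ?_, Or.inr ?_⟩
      · rw [Int.toNat_of_nonneg (by omega : (0 : Int) ≤ e)]; nlinarith
      · rw [Int.toNat_of_nonneg (by omega : (0 : Int) ≤ e)]
        exact (PySem.Int.mod_eq_zero_iff_dvd n e).mpr ⟨d, by rw [he]; ring⟩
      · rw [Int.toNat_of_nonneg (by omega : (0 : Int) ≤ e)]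
        rw [show n = e * d by rw [he]; ring]
        exact (fdiv_mul_cancel d e (by omega)).symm

lemma divisors_nonpos (n : Int) (hn : n ≤ 0) : divisors n = [] := by
  rw [divisors, divisorsAux, dif_neg (by push_cast; omega)]

lemma mem_LB (S : Int) (p : Int × Int) :
    p ∈ LB S ↔
      (∃ x, x ∈ divisors S ∧ (2 ≤ x ∧ 2 ≤ PySem.Int.floordiv S x) ∧ p = (x, x)) ∨
      (∃ t, t ∈ divisors S ∧ (3 ≤ t ∧ PySem.Int.mod t 2 = 1) ∧
        p = (PySem.Int.floordiv (t + 1) 2, PySem.Int.floordiv (t - 1) 2)) ∨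
      (∃ t, t ∈ divisors (2 * S - 1) ∧ (3 ≤ t ∧ 3 * t ≤ 2 * S - 1) ∧
        p = (PySem.Int.floordiv (t + 1) 2, PySem.Int.floordiv (t - 1) 2)) := by
  simp only [LB, List.mem_append, List.mem_map, List.mem_filter, Bool.and_eq_true,
    decide_eq_true_eq]
  constructor
  · rintro ((⟨x, ⟨hx, hc⟩, rfl⟩ | ⟨t, ⟨ht, hc⟩, rfl⟩) | ⟨t, ⟨ht, hc⟩, rfl⟩)
    · exact Or.inl ⟨x, hx, hc, rfl⟩
    · exact Or.inr (Or.inl ⟨t, ht, hc, rfl⟩)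
    · exact Or.inr (Or.inr ⟨t, ht, hc, rfl⟩)
  · rintro (⟨x, hx, hc, rfl⟩ | ⟨t, ht, hc, rfl⟩ | ⟨t, ht, hc, rfl⟩)
    · exact Or.inl (Or.inl ⟨x, ⟨hx, hc⟩, rfl⟩)
    · exact Or.inl (Or.inr ⟨t, ⟨ht, hc⟩, rfl⟩)
    · exact Or.inr ⟨t, ⟨ht, hc⟩, rfl⟩

lemma fdiv_two_succ (y : Int) : PySem.Int.floordiv (y + 1 + y + 1) 2 = y + 1 := by
  rw [show y + 1 + y + 1 = 2 * (y + 1) by ring]; exact fdiv_mul_cancel _ _ (by omega)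

lemma fdiv_two_pred (y : Int) : PySem.Int.floordiv (y + 1 + y - 1) 2 = y := by
  rw [show y + 1 + y - 1 = 2 * y by ring]; exact fdiv_mul_cancel _ _ (by omega)

lemma mem_iff (S : Int) (p : Int × Int) : p ∈ LA S ↔ p ∈ LB S := by
  rw [mem_LA, mem_LB]
  by_cases hS : 1 ≤ S
  case neg =>
    constructor
    · rintro (⟨x, hx2, hxlt, _, _⟩ | ⟨y, hy1, hylt, _, _⟩)
      · have h4 : 2 ≤ PySem.Int.floordiv S 2 := by omega
        have := (PySem.Int.le_floordiv_iff_mul_le (by omega : (0 : Int) < 2)).mp h4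
        omega
      · have h1 : 1 ≤ PySem.Int.floordiv S 2 := by omega
        have := (PySem.Int.le_floordiv_iff_mul_le (by omega : (0 : Int) < 2)).mp h1
        omega
    · rintro (⟨x, hx, _⟩ | ⟨t, ht, _⟩ | ⟨t, ht, _⟩)
      · rw [divisors_nonpos S (by omega)] at hx; simp at hx
      · rw [divisors_nonpos S (by omega)] at ht; simp at ht
      · rw [divisors_nonpos (2 * S - 1) (by omega)] at ht; simp at ht
  case pos =>
    simp only [mem_divisors S hS, mem_divisors (2 * S - 1) (by omega : (1 : Int) ≤ 2 * S - 1)]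
    constructor
    · rintro (⟨x, hx2, hxlt, ⟨hm, hq⟩, rfl⟩ | ⟨y, hy1, hylt, hc, rfl⟩)
      · exact Or.inl ⟨x, ⟨(PySem.Int.mod_eq_zero_iff_dvd S x).mp hm, by omega⟩, ⟨hx2, hq⟩, rfl⟩
      · rcases hc with ⟨hm, hk⟩ | ⟨hm, hk⟩
        · refine Or.inr (Or.inl ⟨y + 1 + y,
            ⟨(PySem.Int.mod_eq_zero_iff_dvd _ _).mp hm, by omega⟩, ⟨by omega, ?_⟩, ?_⟩)
          · rw [PySem.Int.mod_eq_emod_of_pos (by omega : (0 : Int) < 2)]; omega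
          · rw [fdiv_two_succ, fdiv_two_pred]
        · obtain ⟨q, hq⟩ := (PySem.Int.mod_eq_zero_iff_dvd _ _).mp hm
          have hk' := (PySem.Int.le_floordiv_iff_mul_le
            (by omega : (0 : Int) < y + 1 + y)).mp hk
          refine Or.inr (Or.inr ⟨y + 1 + y,
            ⟨⟨2 * q + 1, by linear_combination 2 * hq⟩, by omega⟩, ⟨by omega, by omega⟩, ?_⟩)
          rw [fdiv_two_succ, fdiv_two_pred]
    · rintro (⟨x, ⟨hdvd, hx1⟩, ⟨hx2, hq⟩, rfl⟩ |
        ⟨t, ⟨hdvd, ht1⟩, ⟨ht3, hodd⟩, rfl⟩ | ⟨t, ⟨hdvd, ht1⟩, ⟨ht3, h3t⟩, rfl⟩)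
      · obtain ⟨c, hc⟩ := hdvd
        have hfd : PySem.Int.floordiv S x = c := by rw [hc]; exact fdiv_mul_cancel c x (by omega)
        have hc2 : 2 ≤ c := by rw [hfd] at hq; exact hq
        have hx2S : x ≤ PySem.Int.floordiv S 2 :=
          (PySem.Int.le_floordiv_iff_mul_le (by omega : (0 : Int) < 2)).mpr (by nlinarith)
        exact Or.inl ⟨x, hx2, by omega,
          ⟨(PySem.Int.mod_eq_zero_iff_dvd S x).mpr ⟨c, hc⟩, hq⟩, rfl⟩
      · have hoddt : t % 2 = 1 := by
          rw [PySem.Int.mod_eq_emod_of_pos (by omega : (0 : Int) < 2)] at hodd; exact hodd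
        obtain ⟨y, rfl⟩ : ∃ y, t = 2 * y + 1 := ⟨(t - 1) / 2, by omega⟩
        have htS : 2 * y + 1 ≤ S := Int.le_of_dvd (by omega) hdvd
        have hyr : y ≤ PySem.Int.floordiv S 2 :=
          (PySem.Int.le_floordiv_iff_mul_le (by omega : (0 : Int) < 2)).mpr (by omega)
        refine Or.inr ⟨y, by omega, by omega, Or.inl ⟨?_, ?_⟩, ?_⟩
        · exact (PySem.Int.mod_eq_zero_iff_dvd _ _).mpr
            (by rw [show y + 1 + y = 2 * y + 1 by ring]; exact hdvd)
        · exact (PySem.Int.le_floordiv_iff_mul_le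
            (by omega : (0 : Int) < y + 1 + y)).mpr (by omega)
        · rw [show 2 * y + 1 + 1 = y + 1 + y + 1 by ring, show 2 * y + 1 - 1 = y + 1 + y - 1 by ring,
            fdiv_two_succ, fdiv_two_pred]
      · obtain ⟨q, hq⟩ := hdvd
        rcases Int.even_or_odd t with ⟨m, hm⟩ | ⟨m, hm⟩
        · exfalso
          have h2 : 2 * S - 1 = 2 * (m * q) := by rw [hm] at hq; linear_combination hq
          obtain ⟨k, hk⟩ : ∃ k, 2 * S - 1 = 2 * k := ⟨m * q, h2⟩
          omega
        · subst hm
          rcases Int.even_or_odd q with ⟨r, hr⟩ | ⟨r, hr⟩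
          · exfalso
            have h2 : 2 * S - 1 = 2 * ((2 * m + 1) * r) := by rw [hr] at hq; linear_combination hq
            obtain ⟨k, hk⟩ : ∃ k, 2 * S - 1 = 2 * k := ⟨(2 * m + 1) * r, h2⟩
            omega
          · subst hr
            have hsr : S - (m + 1) = (2 * m + 1) * r := by
              have h2 : 2 * (S - (m + 1)) = 2 * ((2 * m + 1) * r) := by linear_combination hq
              exact Int.eq_of_mul_eq_mul_left (by norm_num) h2
            have hmr : m ≤ PySem.Int.floordiv S 2 :=
              (PySem.Int.le_floordiv_iff_mul_le (by omega : (0 : Int) < 2)).mpr (by omega)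
            refine Or.inr ⟨m, by omega, by omega, Or.inr ⟨?_, ?_⟩, ?_⟩
            · exact (PySem.Int.mod_eq_zero_iff_dvd _ _).mpr
                (by rw [show m + 1 + m = 2 * m + 1 by ring]; exact ⟨r, hsr⟩)
            · exact (PySem.Int.le_floordiv_iff_mul_le
                (by omega : (0 : Int) < m + 1 + m)).mpr (by omega)
            · rw [show 2 * m + 1 + 1 = m + 1 + m + 1 by ring,
                show 2 * m + 1 - 1 = m + 1 + m - 1 by ring, fdiv_two_succ, fdiv_two_pred]

lemma sorted2_eq_sorted_toLex {α : Type} (xs : List α) (k1 k2 : α → Int) :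
    PySem.List.sorted2 xs k1 k2 false =
      PySem.List.sorted xs (fun a => toLex (k1 a, k2 a)) false := by
  unfold PySem.List.sorted2 PySem.List.sorted
  simp only [Bool.false_eq_true, ite_false]
  congr 1
  funext acc x
  congr 1
  funext a b
  by_cases h1 : k1 a < k1 b <;> by_cases h2 : k1 b < k1 a <;> by_cases h3 : k2 a < k2 b <;>
    simp [h1, h2, h3, Prod.Lex.toLex_lt_toLex] <;> omega

lemma main_eq (S : Int) : star_arrangements S = star_arrangements_alt S := by
  have hA : star_arrangements S =
      PySem.List.sorted2 (PySem.Set.ofList (LA S)) (fun p => p.1) (fun p => p.2) false := rfl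
  have hB : star_arrangements_alt S =
      PySem.List.sorted2 (PySem.Set.ofList (LB S)) (fun p => p.1) (fun p => p.2) false := rfl
  rw [hA, hB, sorted2_eq_sorted_toLex, sorted2_eq_sorted_toLex]
  refine PySem.List.sorted_eq_sorted_of_perm _ _ _ ?_ ?_
  · intro a b h
    simpa using toLex_inj.mp h
  · refine (List.perm_ext_iff_of_nodup (PySem.Set.nodup_ofList _) (PySem.Set.nodup_ofList _)).mpr ?_
    intro q
    rw [PySem.Set.mem_ofList, PySem.Set.mem_ofList]
    exact mem_iff S q

-- ===== VERDICT (by name: the statement is the Claim_ definition above) =====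
theorem star_arrangements_spec : Claim_equal_star_arrangements := by
  intro S _
  unfold Spec_star_arrangements
  exact main_eq S
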